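-- pv_equiv track=rewrite | github.com/aseruneko/diceforge-ai | legal_moves.py | pay_pattern
-- ===== SOURCE A (Python) =====
-- def pay_pattern(gold): #playerクラスに突っ込む？
--     #購入が3つに収まるやつの列挙
--     face_gold = [12,8,6,5,4,3,2]
--     pattern = []
--     #1
--     for i in range(7):
--         if gold >= face_gold[i]:
--             pattern.append([face_gold[i]])
--     #2
--     for i in range(7):
--         P = gold
--         if P >= face_gold[i]:
--             P -= face_gold[i]
--             for j in range(i,7):
--                 if P >= face_gold[j]:
--                     pattern.append([face_gold[i],face_gold[j]])
--                 else:
--                     continue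
--         else:
--             continue
--     #3
--     for i in range(7):
--         P = gold
--         if P >= face_gold[i]:
--             Q = P - face_gold[i]
--             for j in range(i,7):
--                 if Q >= face_gold[j]:
--                     R = Q - face_gold[j]
--                     for k in range(j,7):
--                         if R >= face_gold[k]:
--                             pattern.append([face_gold[i],face_gold[j],face_gold[k]])
--                         else:
--                             continue
--                 else:
--                     continue
--         else:
--             continue
--     return pattern
-- ===== SOURCE B (Python) =====
-- def pay_pattern(gold):
--     face_gold = [12, 8, 6, 5, 4, 3, 2]
--
--     def combos(start, length, budget):
--         # non-decreasing-index combinations of `length` faces from index >= start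
--         # that fit in `budget`, in lexicographic index order
--         if length == 0:
--             return [[]]
--         res = []
--         for i in range(start, 7):
--             f = face_gold[i]
--             if budget >= f:
--                 for rest in combos(i, length - 1, budget - f):
--                     res.append([f] + rest)
--         return res
--
--     return combos(0, 1, gold) + combos(0, 2, gold) + combos(0, 3, gold)
-- ===== Notes on version B (the rewrite author's own statement) =====
-- stated objective: simpler
-- what changed: Replaced the three hardcoded loop nests (singles, pairs, triples) by one recursive helper combos(start, length, budget) that enumerates non-decreasing-index combinations of any length, concatenated for the lengths one, two and three.
import Mathlib
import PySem

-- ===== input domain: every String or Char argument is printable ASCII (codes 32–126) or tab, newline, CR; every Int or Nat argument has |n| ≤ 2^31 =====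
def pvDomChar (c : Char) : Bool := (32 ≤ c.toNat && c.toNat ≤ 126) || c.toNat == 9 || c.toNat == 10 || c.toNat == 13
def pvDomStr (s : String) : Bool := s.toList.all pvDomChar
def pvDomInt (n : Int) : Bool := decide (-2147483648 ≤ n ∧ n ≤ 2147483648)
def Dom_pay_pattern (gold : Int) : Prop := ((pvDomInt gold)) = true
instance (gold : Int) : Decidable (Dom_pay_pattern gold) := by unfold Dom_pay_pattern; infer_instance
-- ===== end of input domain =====

-- B replaces A's three hardcoded loop nests by one recursive combination
-- enumerator combos(start, length, budget), concatenated for the lengths one, two and three (objective: simpler).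

-- ===== PORT A =====
def pay_pattern (gold : Int) : List (List Int) :=
  let face_gold : List Int := [12, 8, 6, 5, 4, 3, 2]
  let pattern : List (List Int) := []
  -- #1
  let pattern := (PySem.List.pyRange 0 7 1).foldl (fun pattern i =>
    if gold ≥ PySem.List.pyGetD face_gold i 0 then
      pattern ++ [[PySem.List.pyGetD face_gold i 0]]
    else pattern) pattern
  -- #2
  let pattern := (PySem.List.pyRange 0 7 1).foldl (fun pattern i =>
    let P := gold
    if P ≥ PySem.List.pyGetD face_gold i 0 then
      let P := P - PySem.List.pyGetD face_gold i 0
      (PySem.List.pyRange i 7 1).foldl (fun pattern j =>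
        if P ≥ PySem.List.pyGetD face_gold j 0 then
          pattern ++ [[PySem.List.pyGetD face_gold i 0, PySem.List.pyGetD face_gold j 0]]
        else pattern) pattern
    else pattern) pattern
  -- #3
  let pattern := (PySem.List.pyRange 0 7 1).foldl (fun pattern i =>
    let P := gold
    if P ≥ PySem.List.pyGetD face_gold i 0 then
      let Q := P - PySem.List.pyGetD face_gold i 0
      (PySem.List.pyRange i 7 1).foldl (fun pattern j =>
        if Q ≥ PySem.List.pyGetD face_gold j 0 then
          let R := Q - PySem.List.pyGetD face_gold j 0
          (PySem.List.pyRange j 7 1).foldl (fun pattern k =>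
            if R ≥ PySem.List.pyGetD face_gold k 0 then
              pattern ++ [[PySem.List.pyGetD face_gold i 0, PySem.List.pyGetD face_gold j 0,
                           PySem.List.pyGetD face_gold k 0]]
            else pattern) pattern
        else pattern) pattern
    else pattern) pattern
  pattern

-- ===== PORT B =====
def pvFaceGold : List Int := [12, 8, 6, 5, 4, 3, 2]

def pvCombos (start : Int) (length : Nat) (budget : Int) : List (List Int) :=
  match length with
  | 0 => [[]]
  | Nat.succ l =>
    (PySem.List.pyRange start 7 1).foldl (fun res i =>
      let f := PySem.List.pyGetD pvFaceGold i 0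
      if budget ≥ f then res ++ (pvCombos i l (budget - f)).map (fun rest => f :: rest)
      else res) []

def pay_pattern_alt (gold : Int) : List (List Int) :=
  pvCombos 0 1 gold ++ pvCombos 0 2 gold ++ pvCombos 0 3 gold

-- ===== PRECONDITION & SPEC =====
def Spec_pay_pattern (gold : Int) (out : List (List Int)) : Prop := out = pay_pattern_alt gold
instance (gold : Int) (out : List (List Int)) : Decidable (Spec_pay_pattern gold out) := by unfold Spec_pay_pattern; infer_instance

-- ===== CLAIM (what is proved, stated in full; the proofs are below) =====
def Claim_equal_pay_pattern : Prop := ∀ (gold : Int), Dom_pay_pattern gold → Spec_pay_pattern gold (pay_pattern gold)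

-- ===== LEMMAS AND PROOFS =====

-- a fold that conditionally extends the accumulator is an append of a flatMap
theorem pv_foldl_append_if {α β : Type} (l : List α) (p : α → Prop) [DecidablePred p]
    (g : α → List β) (acc : List β) :
    l.foldl (fun a x => if p x then a ++ g x else a) acc
      = acc ++ l.flatMap (fun x => if p x then g x else []) := by
  induction l generalizing acc with
  | nil => simp
  | cons h t ih => by_cases hp : p h <;> simp [hp, ih]


-- foldl congruence with explicit functions (explicit so that rw can be given g)
theorem pv_foldl_congr {α β : Type} (l : List α) (f g : β → α → β) (init : β)
    (h : ∀ acc x, x ∈ l → f acc x = g acc x) : l.foldl f init = l.foldl g init := by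
  induction l generalizing init with
  | nil => rfl
  | cons a t ih =>
    simp only [List.foldl_cons]
    rw [h init a (by simp)]
    exact ih _ (fun acc x hx => h acc x (by simp [hx]))

-- shorthand for face_gold[i]
abbrev pvF (i : Int) : Int := PySem.List.pyGetD [12, 8, 6, 5, 4, 3, 2] i 0

theorem pvCombos_succ (s : Int) (l : Nat) (b : Int) :
    pvCombos s (l + 1) b
      = (PySem.List.pyRange s 7 1).flatMap
          (fun i => if b ≥ pvF i then (pvCombos i l (b - pvF i)).map (pvF i :: ·) else []) := by
  show (PySem.List.pyRange s 7 1).foldl _ [] = _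
  rw [pv_foldl_append_if (PySem.List.pyRange s 7 1)
      (fun i => b ≥ PySem.List.pyGetD pvFaceGold i 0)
      (fun i => (pvCombos i l (b - PySem.List.pyGetD pvFaceGold i 0)).map
        (PySem.List.pyGetD pvFaceGold i 0 :: ·)) []]
  simp [pvFaceGold, pvF]

-- combos of length 1 starting at s within budget b, with an arbitrary already-chosen prefix
theorem pv_inner1 (s b : Int) (pre : List Int) (acc : List (List Int)) :
    (PySem.List.pyRange s 7 1).foldl (fun pat j =>
        if b ≥ pvF j then pat ++ [pre ++ [pvF j]] else pat) acc
      = acc ++ (pvCombos s 1 b).map (pre ++ ·) := by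
  rw [pv_foldl_append_if (PySem.List.pyRange s 7 1) (fun j => b ≥ pvF j)
      (fun j => [pre ++ [pvF j]]) acc, pvCombos_succ]
  congr 1
  rw [List.map_flatMap]
  refine List.flatMap_congr ?_
  intro j _
  by_cases hp : b ≥ pvF j <;> simp [hp, pvCombos]

-- combos of length 2 starting at s within budget b, with an arbitrary prefix
theorem pv_inner2 (s b : Int) (pre : List Int) (acc : List (List Int)) :
    (PySem.List.pyRange s 7 1).foldl (fun pat j =>
        if b ≥ pvF j then
          (PySem.List.pyRange j 7 1).foldl (fun pat k =>
            if b - pvF j ≥ pvF k then pat ++ [pre ++ [pvF j, pvF k]] else pat) pat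
        else pat) acc
      = acc ++ (pvCombos s 2 b).map (pre ++ ·) := by
  have h1 : ∀ (pat : List (List Int)) (j : Int), j ∈ PySem.List.pyRange s 7 1 →
      (if b ≥ pvF j then
          (PySem.List.pyRange j 7 1).foldl (fun pat k =>
            if b - pvF j ≥ pvF k then pat ++ [pre ++ [pvF j, pvF k]] else pat) pat
        else pat)
      = if b ≥ pvF j then
          pat ++ (pvCombos j 1 (b - pvF j)).map (fun r => pre ++ pvF j :: r)
        else pat := by
    intro pat j _
    by_cases hp : b ≥ pvF j
    · simp only [hp, if_pos]
      have := pv_inner1 j (b - pvF j) (pre ++ [pvF j]) pat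
      simpa using this
    · simp [hp]
  rw [pv_foldl_congr (PySem.List.pyRange s 7 1) _
      (fun pat j => if b ≥ pvF j then
          pat ++ (pvCombos j 1 (b - pvF j)).map (fun r => pre ++ pvF j :: r)
        else pat) acc h1]
  rw [pv_foldl_append_if (PySem.List.pyRange s 7 1) (fun j => b ≥ pvF j)
      (fun j => (pvCombos j 1 (b - pvF j)).map (fun r => pre ++ pvF j :: r)) acc]
  have h2 : pvCombos s 2 b = pvCombos s (1 + 1) b := rfl
  rw [h2, pvCombos_succ]
  congr 1
  rw [List.map_flatMap]
  refine List.flatMap_congr ?_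
  intro j _
  by_cases hp : b ≥ pvF j <;> simp [hp, Function.comp]

-- combos of length 3 starting at 0 (A's block #3)
theorem pv_outer3 (b : Int) (acc : List (List Int)) :
    (PySem.List.pyRange 0 7 1).foldl (fun pat i =>
        if b ≥ pvF i then
          (PySem.List.pyRange i 7 1).foldl (fun pat j =>
            if b - pvF i ≥ pvF j then
              (PySem.List.pyRange j 7 1).foldl (fun pat k =>
                if b - pvF i - pvF j ≥ pvF k then pat ++ [[pvF i, pvF j, pvF k]] else pat) pat
            else pat) pat
        else pat) acc
      = acc ++ pvCombos 0 3 b := by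
  have h1 : ∀ (pat : List (List Int)) (i : Int), i ∈ PySem.List.pyRange 0 7 1 →
      (if b ≥ pvF i then
          (PySem.List.pyRange i 7 1).foldl (fun pat j =>
            if b - pvF i ≥ pvF j then
              (PySem.List.pyRange j 7 1).foldl (fun pat k =>
                if b - pvF i - pvF j ≥ pvF k then pat ++ [[pvF i, pvF j, pvF k]] else pat) pat
            else pat) pat
        else pat)
      = if b ≥ pvF i then pat ++ (pvCombos i 2 (b - pvF i)).map (pvF i :: ·) else pat := by
    intro pat i _
    by_cases hp : b ≥ pvF i
    · simp only [hp, if_pos]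
      have := pv_inner2 i (b - pvF i) [pvF i] pat
      simpa using this
    · simp [hp]
  rw [pv_foldl_congr (PySem.List.pyRange 0 7 1) _
      (fun pat i => if b ≥ pvF i then
          pat ++ (pvCombos i 2 (b - pvF i)).map (pvF i :: ·)
        else pat) acc h1]
  rw [pv_foldl_append_if (PySem.List.pyRange 0 7 1) (fun i => b ≥ pvF i)
      (fun i => (pvCombos i 2 (b - pvF i)).map (pvF i :: ·)) acc]
  have h2 : pvCombos 0 3 b = pvCombos 0 (2 + 1) b := rfl
  rw [h2, pvCombos_succ]

-- A's block #1
theorem pv_outer1 (b : Int) (acc : List (List Int)) :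
    (PySem.List.pyRange 0 7 1).foldl (fun pat i =>
        if b ≥ pvF i then pat ++ [[pvF i]] else pat) acc
      = acc ++ pvCombos 0 1 b := by
  have := pv_inner1 0 b [] acc
  simpa using this

-- A's block #2
theorem pv_outer2 (b : Int) (acc : List (List Int)) :
    (PySem.List.pyRange 0 7 1).foldl (fun pat i =>
        if b ≥ pvF i then
          (PySem.List.pyRange i 7 1).foldl (fun pat j =>
            if b - pvF i ≥ pvF j then pat ++ [[pvF i, pvF j]] else pat) pat
        else pat) acc
      = acc ++ pvCombos 0 2 b := by
  have h1 : ∀ (pat : List (List Int)) (i : Int), i ∈ PySem.List.pyRange 0 7 1 →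
      (if b ≥ pvF i then
          (PySem.List.pyRange i 7 1).foldl (fun pat j =>
            if b - pvF i ≥ pvF j then pat ++ [[pvF i, pvF j]] else pat) pat
        else pat)
      = if b ≥ pvF i then pat ++ (pvCombos i 1 (b - pvF i)).map (pvF i :: ·) else pat := by
    intro pat i _
    by_cases hp : b ≥ pvF i
    · simp only [hp, if_pos]
      have := pv_inner1 i (b - pvF i) [pvF i] pat
      simpa using this
    · simp [hp]
  rw [pv_foldl_congr (PySem.List.pyRange 0 7 1) _
      (fun pat i => if b ≥ pvF i then
          pat ++ (pvCombos i 1 (b - pvF i)).map (pvF i :: ·)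
        else pat) acc h1]
  rw [pv_foldl_append_if (PySem.List.pyRange 0 7 1) (fun i => b ≥ pvF i)
      (fun i => (pvCombos i 1 (b - pvF i)).map (pvF i :: ·)) acc]
  have h2 : pvCombos 0 2 b = pvCombos 0 (1 + 1) b := rfl
  rw [h2, pvCombos_succ]

-- ===== VERDICT (by name: the statement is the Claim_ definition above) =====
theorem pay_pattern_spec : Claim_equal_pay_pattern := by
  intro gold _
  show pay_pattern gold = pay_pattern_alt gold
  simp only [pay_pattern, pay_pattern_alt]
  rw [pv_outer1, pv_outer2, pv_outer3]
  simp [List.append_assoc]
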